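-- pv_equiv track=rewrite | github.com/FeelCoolOne/scdata | src/match_standard_address.py | filter_nearby_street_NonNum
-- ===== SOURCE A (Python) =====
-- def filter_nearby_street_NonNum(addressTxt, streetNonNums):
--     """Approximate match for NonNum address.
--
--         When `street_num` has not digit num, match with size of common
--     characters.
--     """
--     matchedIdx, minDistance = list(), 10**6
--     for idx, streetTxt in enumerate(streetNonNums):
--         dis = - len(set(streetTxt) & set(addressTxt))
--         if dis < minDistance:
--             minDistance = dis
--             matchedIdx = [idx]
--         elif dis == minDistance:
--             matchedIdx.append(idx)
--         else:
--             continue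
--     return matchedIdx, list(map(lambda x: streetNonNums[x], matchedIdx))
-- ===== SOURCE B (Python) =====
-- def filter_nearby_street_NonNum(addressTxt, streetNonNums):
--     """Approximate match for NonNum address (table-build-then-select rewrite)."""
--     if not streetNonNums:
--         return [], []
--     aset = set(addressTxt)
--     scores = [len(set(s) & aset) for s in streetNonNums]
--     best = max(scores)
--     matchedIdx = [i for i, v in enumerate(scores) if v == best]
--     return matchedIdx, [streetNonNums[i] for i in matchedIdx]
-- ===== Notes on version B (the rewrite author's own statement) =====
-- stated objective: faster
-- what changed: Replaces the fused single-pass min-tracking loop (10**6 sentinel, negated distances) by a two-pass table-build-then-select: build the overlap-score list with set(addressTxt) hoisted out of the loop, take max, collect argmax indices by comprehension.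
import Mathlib
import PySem

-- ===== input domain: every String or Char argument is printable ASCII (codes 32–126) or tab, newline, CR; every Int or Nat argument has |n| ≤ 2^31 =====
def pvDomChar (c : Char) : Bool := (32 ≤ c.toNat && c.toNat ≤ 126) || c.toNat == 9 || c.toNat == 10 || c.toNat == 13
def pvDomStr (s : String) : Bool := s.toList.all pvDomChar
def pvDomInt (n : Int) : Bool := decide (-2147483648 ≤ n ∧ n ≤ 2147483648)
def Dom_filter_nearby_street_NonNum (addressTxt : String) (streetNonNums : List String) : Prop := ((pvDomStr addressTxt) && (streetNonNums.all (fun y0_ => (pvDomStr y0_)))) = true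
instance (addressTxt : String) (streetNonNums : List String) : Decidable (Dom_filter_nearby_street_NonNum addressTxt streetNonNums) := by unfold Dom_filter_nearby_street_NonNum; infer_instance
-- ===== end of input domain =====

-- B replaces A's fused single-pass min-tracking loop (sentinel 10**6, negated distances) by a
-- two-pass table-build-then-select structure with set(addressTxt) hoisted out of the loop;
-- a timing run measured B faster.

-- ===== PORT A =====
-- literal transliteration of A's fused loop over enumerate(streetNonNums)
def filter_nearby_street_NonNum (addressTxt : String) (streetNonNums : List String) : List Int × List String :=
  let r := (PySem.List.enumerate streetNonNums).foldl
    (fun (st : List Int × Int) (p : Int × String) =>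
      let dis : Int := -(PySem.Set.len (PySem.Set.inter (PySem.Set.ofList p.2.toList) (PySem.Set.ofList addressTxt.toList)))
      if dis < st.2 then ([p.1], dis)
      else if dis = st.2 then (st.1 ++ [p.1], st.2)
      else st)
    ([], 10 ^ 6)
  (r.1, r.1.map (fun x => PySem.List.pyGetD streetNonNums x ""))

-- ===== PORT B =====
-- literal transliteration of Source B: guard empty, build scores table, take max, select argmax indices
def filter_nearby_street_NonNum_alt (addressTxt : String) (streetNonNums : List String) : List Int × List String :=
  if streetNonNums = [] then ([], [])
  else
    let aset := PySem.Set.ofList addressTxt.toList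
    let scores := streetNonNums.map (fun s => PySem.Set.len (PySem.Set.inter (PySem.Set.ofList s.toList) aset))
    let best := (PySem.List.max? scores (fun v => v)).getD 0
    let matchedIdx := (PySem.List.enumerate scores).filterMap (fun p => if p.2 = best then some p.1 else none)
    (matchedIdx, matchedIdx.map (fun i => PySem.List.pyGetD streetNonNums i ""))

-- ===== PRECONDITION & SPEC =====
def Spec_filter_nearby_street_NonNum (addressTxt : String) (streetNonNums : List String) (out : List Int × List String) : Prop := out = filter_nearby_street_NonNum_alt addressTxt streetNonNums
instance (addressTxt : String) (streetNonNums : List String) (out : List Int × List String) : Decidable (Spec_filter_nearby_street_NonNum addressTxt streetNonNums out) := by unfold Spec_filter_nearby_street_NonNum; infer_instance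

-- ===== CLAIM (what is proved, stated in full; the proofs are below) =====
def Claim_equal_filter_nearby_street_NonNum : Prop := ∀ (addressTxt : String) (streetNonNums : List String), Dom_filter_nearby_street_NonNum addressTxt streetNonNums → Spec_filter_nearby_street_NonNum addressTxt streetNonNums (filter_nearby_street_NonNum addressTxt streetNonNums)

-- ===== LEMMAS AND PROOFS =====

-- A's loop step, on an already-scored pair (index, score)
def pvStep (st : List Int × Int) (p : Int × Int) : List Int × Int :=
  if -p.2 < st.2 then ([p.1], -p.2)
  else if -p.2 = st.2 then (st.1 ++ [p.1], st.2)
  else st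

-- running maximum of a nonempty list (0 on [])
def pvMax : List Int → Int
  | [] => 0
  | x :: t => t.foldl max x

lemma pvMax_bound (l : List Int) : ∀ y ∈ l, y ≤ pvMax l := by
  intro y hy
  cases l with
  | nil => cases hy
  | cons x t =>
    rcases List.mem_cons.mp hy with h | h
    · subst h; exact (PySem.List.le_foldl_max t y).1
    · exact (PySem.List.le_foldl_max t x).2 y h

lemma pvMax_append (l : List Int) (hl : l ≠ []) (v : Int) :
    pvMax (l ++ [v]) = max (pvMax l) v := by
  cases l with
  | nil => exact absurd rfl hl
  | cons x t => simp [pvMax, List.foldl_append]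

lemma enumerate_map (f : String → Int) (xs : List String) (s : Int) :
    PySem.List.enumerate (xs.map f) s =
      (PySem.List.enumerate xs s).map (fun p => (p.1, f p.2)) := by
  induction xs generalizing s with
  | nil => simp [PySem.List.enumerate]
  | cons x t ih => simp [PySem.List.enumerate_cons, ih]

-- characterization of A's fused loop: it computes the argmax indices and minus-the-max
lemma pvLoop_char (l : List Int) (hl : l ≠ []) (hnn : ∀ v ∈ l, 0 ≤ v) :
    (PySem.List.enumerate l).foldl pvStep ([], 10 ^ 6) =
      ((PySem.List.enumerate l).filterMap
        (fun p => if p.2 = pvMax l then some p.1 else none), -(pvMax l)) := by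
  induction l using List.reverseRecOn with
  | nil => exact absurd rfl hl
  | append_singleton l v ih =>
    have hv : (0 : Int) ≤ v := hnn v (by simp)
    rcases eq_or_ne l [] with rfl | hne
    · simp [PySem.List.enumerate, PySem.List.enumerate_cons, pvStep, pvMax]
      intro h; exact absurd h (by omega)
    · have hnn' : ∀ w ∈ l, 0 ≤ w := fun w hw => hnn w (by simp [hw])
      have hb := pvMax_bound l
      rw [PySem.List.enumerate_append, List.foldl_append, List.filterMap_append,
        ih hne hnn', pvMax_append l hne v]
      simp only [PySem.List.enumerate_cons, PySem.List.enumerate_nil, List.foldl_cons,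
        List.foldl_nil, List.filterMap_cons, List.filterMap_nil]
      rcases lt_trichotomy (pvMax l) v with h | h | h
      · have hmax : max (pvMax l) v = v := by omega
        have hpre : (PySem.List.enumerate l).filterMap
            (fun p => if p.2 = v then some p.1 else none) = [] := by
          rw [List.filterMap_eq_nil_iff]
          intro p hp
          rcases (PySem.List.mem_enumerate_iff l 0 p).mp hp with ⟨k, hk, rfl⟩
          have := hb _ (List.getElem_mem hk)
          simp only [ite_eq_right_iff]
          intro he; omega
        have hstep : -v < -(pvMax l) := by omega
        simp [pvStep, hmax, hstep, hpre]
      · subst h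
        simp [pvStep]
      · have hmax : max (pvMax l) v = pvMax l := by omega
        have h1 : ¬ (-v < -(pvMax l)) := by omega
        have h2 : ¬ (-v = -(pvMax l)) := by omega
        have h3 : v ≠ pvMax l := by omega
        simp [pvStep, hmax, h1, h2, h3]

lemma max?_getD_eq_pvMax (l : List Int) (hl : l ≠ []) :
    (PySem.List.max? l (fun v => v)).getD 0 = pvMax l := by
  cases l with
  | nil => exact absurd rfl hl
  | cons x t => rw [PySem.List.max?_id_cons]; rfl

-- ===== VERDICT (by name: the statement is the Claim_ definition above) =====
theorem filter_nearby_street_NonNum_spec : Claim_equal_filter_nearby_street_NonNum := by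
  intro addressTxt streetNonNums _
  unfold Spec_filter_nearby_street_NonNum
  unfold filter_nearby_street_NonNum filter_nearby_street_NonNum_alt
  rcases eq_or_ne streetNonNums [] with rfl | hne
  · simp [PySem.List.enumerate]
  · simp only [if_neg hne]
    set f : String → Int :=
      fun s => PySem.Set.len (PySem.Set.inter (PySem.Set.ofList s.toList)
        (PySem.Set.ofList addressTxt.toList)) with hf
    have hmapne : streetNonNums.map f ≠ [] := by
      simpa using hne
    have hnn : ∀ v ∈ streetNonNums.map f, 0 ≤ v := by
      intro v hv
      rcases List.mem_map.mp hv with ⟨s, _, rfl⟩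
      simp [hf, PySem.Set.len]
    have hA : (PySem.List.enumerate streetNonNums).foldl
        (fun (st : List Int × Int) (p : Int × String) =>
          let dis : Int := -(PySem.Set.len (PySem.Set.inter (PySem.Set.ofList p.2.toList)
            (PySem.Set.ofList addressTxt.toList)))
          if dis < st.2 then ([p.1], dis)
          else if dis = st.2 then (st.1 ++ [p.1], st.2)
          else st)
        ([], 10 ^ 6) =
        (PySem.List.enumerate (streetNonNums.map f)).foldl pvStep ([], 10 ^ 6) := by
      rw [enumerate_map, List.foldl_map]
      rfl
    rw [hA, pvLoop_char _ hmapne hnn, max?_getD_eq_pvMax _ hmapne]
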